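-- pv_equiv track=rewrite | github.com/aliwajahat12/Voice-Enabled-Order-Processing-And-Fulfilment-System | contextExtraction/get_category.py | recognizeCategory
-- ===== SOURCE A (Python) =====
-- from collections import OrderedDict
-- from operator import itemgetter
--
-- def minDis(s1, s2, n, m, dp) :
--
--   # If any string is empty,
--   # return the remaining characters of other string
--   if(n == 0) :
--       return m
--   if(m == 0) :
--       return n
--
--   # To check if the recursive tree
--   # for given n & m has already been executed
--   if(dp[n][m] != -1)  :
--       return dp[n][m];
--
--   # If characters are equal, execute
--   # recursive function for n-1, m-1
--   if(s1[n - 1] == s2[m - 1]) :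
--     if(dp[n - 1][m - 1] == -1) :
--         dp[n][m] = minDis(s1, s2, n - 1, m - 1, dp)
--         return dp[n][m]
--     else :
--         dp[n][m] = dp[n - 1][m - 1]
--         return dp[n][m]
--     # If characters are nt equal, we need to
--     # find the minimum cost out of all 3 operations.
--   else :
--     if(dp[n - 1][m] != -1) :
--       m1 = dp[n - 1][m]
--     else :
--       m1 = minDis(s1, s2, n - 1, m, dp)
--
--     if(dp[n][m - 1] != -1) :
--       m2 = dp[n][m - 1]
--     else :
--       m2 = minDis(s1, s2, n, m - 1, dp)
--     if(dp[n - 1][m - 1] != -1) :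
--       m3 = dp[n - 1][m - 1]
--     else :
--       m3 = minDis(s1, s2, n - 1, m - 1, dp)
--
--     dp[n][m] = 1 + min(m1, min(m2, m3))
--     return dp[n][m]
--
-- listed_categories = ['clothes','cosmetics','food','stationary','frozen','beverages','grocery']
--
-- def recognizeCategory(trigram):
--
--     wordRank = {}
--     for testWord in trigram:
--       for name in listed_categories:
--           n=len(testWord)
--           m=len(name)
--           dp = [[-1 for i in range(m + 1)] for j in range(n + 1)]
--           editDistance = minDis(testWord, name,n, m,dp)
--           wordRank[name] = editDistance
--     sortedStores = OrderedDict(sorted(wordRank.items(), key=itemgetter(1)))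
--     matchingWord = list(sortedStores.keys())[0]
--
--     return matchingWord
-- ===== SOURCE B (Python) =====
-- listed_categories = ['clothes','cosmetics','food','stationary','frozen','beverages','grocery']
--
-- def _levenshtein(a, b):
--     # iterative bottom-up DP with a single rolling row
--     prev = list(range(len(b) + 1))
--     for i in range(1, len(a) + 1):
--         cur = [i]
--         for j in range(1, len(b) + 1):
--             if a[i - 1] == b[j - 1]:
--                 cur.append(prev[j - 1])
--             else:
--                 cur.append(1 + min(prev[j], min(cur[j - 1], prev[j - 1])))
--         prev = cur
--     return prev[-1]
--
-- def recognizeCategory(trigram):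
--     # only the last word's distances survive A's overwriting; first strict minimum
--     # matches the stable-sort tie-break
--     word = trigram[-1]
--     best = None
--     for name in listed_categories:
--         d = _levenshtein(word, name)
--         if best is None or d < best[1]:
--             best = (name, d)
--     return best[0]
-- ===== Notes on version B (the rewrite author's own statement) =====
-- stated objective: faster
-- what changed: Replaces the memoized recursive minDis plus dict-overwriting double loop over every word and a stable sort with an iterative rolling-row Levenshtein DP computed only for the last word (the only one A's overwriting keeps) and a single first-strict-minimum scan over the categories.
import Mathlib
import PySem

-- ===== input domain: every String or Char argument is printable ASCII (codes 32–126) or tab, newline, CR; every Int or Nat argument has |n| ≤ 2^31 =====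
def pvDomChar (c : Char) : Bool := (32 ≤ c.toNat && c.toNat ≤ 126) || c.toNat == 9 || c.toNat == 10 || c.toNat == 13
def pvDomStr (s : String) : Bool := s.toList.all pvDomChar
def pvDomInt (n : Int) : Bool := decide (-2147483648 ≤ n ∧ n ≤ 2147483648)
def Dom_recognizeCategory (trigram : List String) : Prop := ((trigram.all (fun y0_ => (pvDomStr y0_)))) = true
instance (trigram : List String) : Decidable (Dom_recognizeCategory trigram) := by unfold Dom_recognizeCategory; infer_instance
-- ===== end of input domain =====

-- B replaces A's memoized-recursive edit distance + dict-overwriting double loop + stable sort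
-- by a bottom-up rolling-row Levenshtein DP on the LAST word only (A's overwriting discards the
-- rest, so B skips them entirely) and a first-strict-minimum scan; objective: faster (measured).

-- ===== PORT A =====
def listedCategories : List String :=
  ["clothes", "cosmetics", "food", "stationary", "frozen", "beverages", "grocery"]

-- dp[i][j] read/write. On every call recognizeCategory makes, the indices are inside the
-- (n+1)×(m+1) table (the recursion only shrinks them), so getD/set are exact there.
def get2 (dp : List (List Int)) (i j : Nat) : Int := (dp.getD i []).getD j (-1)

def set2 (dp : List (List Int)) (i j : Nat) (v : Int) : List (List Int) :=
  dp.set i ((dp.getD i []).set j v)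

-- tiny termination facts for minDisA (cited by its decreasing_by)
theorem pvDecBoth {n m : Nat} (hn : ¬ n = 0) (hm : ¬ m = 0) : n - 1 + (m - 1) < n + m :=
  Nat.add_lt_add (Nat.sub_lt (Nat.pos_of_ne_zero hn) Nat.one_pos)
    (Nat.sub_lt (Nat.pos_of_ne_zero hm) Nat.one_pos)
theorem pvDecLeft {n m : Nat} (hn : ¬ n = 0) : n - 1 + m < n + m :=
  Nat.add_lt_add_right (Nat.sub_lt (Nat.pos_of_ne_zero hn) Nat.one_pos) m
theorem pvDecRight {n m : Nat} (hm : ¬ m = 0) : n + (m - 1) < n + m :=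
  Nat.add_lt_add_left (Nat.sub_lt (Nat.pos_of_ne_zero hm) Nat.one_pos) n

-- literal port of minDis; the mutated dp table is threaded through as the second component,
-- and 'dp[n][m] = X; return dp[n][m]' returns X (the write is always in range on A's calls).
def minDisA (s1 s2 : List Char) (n m : Nat) (dp : List (List Int)) : Int × List (List Int) :=
  if _hn : n = 0 then ((m : Int), dp)
  else if _hm : m = 0 then ((n : Int), dp)
  else if get2 dp n m ≠ -1 then (get2 dp n m, dp)
  else if s1.getD (n - 1) ' ' == s2.getD (m - 1) ' ' then
    if get2 dp (n - 1) (m - 1) = -1 then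
      let r := minDisA s1 s2 (n - 1) (m - 1) dp
      (r.1, set2 r.2 n m r.1)
    else
      (get2 dp (n - 1) (m - 1), set2 dp n m (get2 dp (n - 1) (m - 1)))
  else
    let p1 := if get2 dp (n - 1) m ≠ -1 then (get2 dp (n - 1) m, dp)
              else minDisA s1 s2 (n - 1) m dp
    let p2 := if get2 p1.2 n (m - 1) ≠ -1 then (get2 p1.2 n (m - 1), p1.2)
              else minDisA s1 s2 n (m - 1) p1.2
    let p3 := if get2 p2.2 (n - 1) (m - 1) ≠ -1 then (get2 p2.2 (n - 1) (m - 1), p2.2)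
              else minDisA s1 s2 (n - 1) (m - 1) p2.2
    let v := 1 + min p1.1 (min p2.1 p3.1)
    (v, set2 p3.2 n m v)
termination_by n + m
decreasing_by
  all_goals first
    | exact pvDecBoth _hn _hm
    | exact pvDecLeft _hn
    | exact pvDecRight _hm

def recognizeCategory (trigram : List String) : String :=
  let wordRank : PySem.Dict String Int :=
    trigram.foldl (fun wordRank testWord =>
      listedCategories.foldl (fun wordRank name =>
        let n := testWord.toList.length        -- len(testWord)
        let m := name.toList.length            -- len(name)
        let dp := (List.range (n + 1)).map (fun _ => (List.range (m + 1)).map (fun _ => (-1 : Int)))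
        let editDistance := (minDisA testWord.toList name.toList n m dp).1
        wordRank.insert name editDistance) wordRank) PySem.Dict.empty
  let sortedStores := PySem.Dict.ofList (PySem.List.sorted wordRank.items (fun p => p.2) false)
  -- list(sortedStores.keys())[0]: IndexError when trigram = [] → excluded by Pre_
  ((PySem.List.pyGet? sortedStores.keys 0).getD "")

-- ===== PORT B =====
-- bottom-up Levenshtein with one rolling row (port of Source B's _levenshtein)
def levAlt (a b : List Char) : Int :=
  let prev0 := PySem.List.pyRange 0 ((b.length : Int) + 1) 1   -- list(range(len(b)+1))
  let prev := (PySem.List.pyRange 1 ((a.length : Int) + 1) 1).foldl (fun prev i =>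
      (PySem.List.pyRange 1 ((b.length : Int) + 1) 1).foldl (fun cur j =>
        if PySem.List.pyGetD a (i - 1) ' ' == PySem.List.pyGetD b (j - 1) ' ' then
          cur ++ [PySem.List.pyGetD prev (j - 1) 0]
        else
          cur ++ [1 + min (PySem.List.pyGetD prev j 0)
                    (min (PySem.List.pyGetD cur (j - 1) 0) (PySem.List.pyGetD prev (j - 1) 0))])
        [i]) prev0
  PySem.List.pyGetD prev (-1) 0                                 -- prev[-1]

def recognizeCategory_alt (trigram : List String) : String :=
  let word := (PySem.List.pyGet? trigram (-1)).getD ""          -- trigram[-1]; IndexError on [] → Pre_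
  let best := listedCategories.foldl (fun best name =>
      let d := levAlt word.toList name.toList
      match best with
      | none => some (name, d)
      | some b => if d < b.2 then some (name, d) else some b) (none : Option (String × Int))
  (best.map Prod.fst).getD ""

-- ===== PRECONDITION & SPEC =====
-- Pre_ excludes only the empty list, on which both Pythons raise IndexError.
def Pre_recognizeCategory (trigram : List String) : Prop := trigram ≠ []
instance (trigram : List String) : Decidable (Pre_recognizeCategory trigram) := by
  unfold Pre_recognizeCategory; infer_instance

def pvWitness_recognizeCategory : List String := ["fod"]

def Spec_recognizeCategory (trigram : List String) (out : String) : Prop :=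
  out = recognizeCategory_alt trigram
instance (trigram : List String) (out : String) : Decidable (Spec_recognizeCategory trigram out) := by
  unfold Spec_recognizeCategory; infer_instance

-- ===== CLAIM (what is proved, stated in full; the proofs are below) =====
def Claim_equal_recognizeCategory : Prop :=
  ∀ (trigram : List String), Dom_recognizeCategory trigram → Pre_recognizeCategory trigram →
    Spec_recognizeCategory trigram (recognizeCategory trigram)

-- ===== LEMMAS AND PROOFS =====

theorem getD_set' {α : Type} (l : List α) (i j : Nat) (x : α) (d : α) :
    (l.set i x).getD j d = if i = j ∧ i < l.length then x else l.getD j d := by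
  simp only [List.getD_eq_getElem?_getD, List.getElem?_set]
  by_cases h : i = j
  · subst h
    by_cases h2 : i < l.length
    · simp [h2]
    · simp [h2]
  · simp [h]

theorem get2_set2_ne (dp : List (List Int)) (n m i j : Nat) (v : Int) (h : i ≠ n ∨ j ≠ m) :
    get2 (set2 dp n m v) i j = get2 dp i j := by
  unfold get2 set2
  rw [getD_set']
  split_ifs with h1
  · obtain ⟨h1, h2⟩ := h1
    subst h1
    have hj : j ≠ m := by tauto
    rw [getD_set']
    split_ifs with h3
    · exact absurd h3.1.symm hj
    · rfl
  · rfl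

theorem get2_set2_self (dp : List (List Int)) (n m : Nat) (v : Int) :
    get2 (set2 dp n m v) n m = v ∨ get2 (set2 dp n m v) n m = get2 dp n m := by
  unfold get2 set2
  rw [getD_set']
  split_ifs with h1
  · rw [getD_set']
    split_ifs with h3
    · exact Or.inl rfl
    · exact Or.inr rfl
  · exact Or.inr rfl

def lev (s1 s2 : List Char) : Nat → Nat → Nat
  | 0, m => m
  | n + 1, 0 => n + 1
  | n + 1, m + 1 =>
    if s1.getD n ' ' == s2.getD m ' ' then lev s1 s2 n m
    else 1 + min (lev s1 s2 n (m + 1)) (min (lev s1 s2 (n + 1) m) (lev s1 s2 n m))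
termination_by n m => n + m

theorem lev_succ_succ (s1 s2 : List Char) (n m : Nat) :
    lev s1 s2 (n + 1) (m + 1) =
      if s1.getD n ' ' == s2.getD m ' ' then lev s1 s2 n m
      else 1 + min (lev s1 s2 n (m + 1)) (min (lev s1 s2 (n + 1) m) (lev s1 s2 n m)) := by
  rw [lev]

def InvDP (s1 s2 : List Char) (dp : List (List Int)) : Prop :=
  ∀ i j, get2 dp i j = -1 ∨ get2 dp i j = (lev s1 s2 i j : Int)

theorem Inv_set2 (s1 s2 : List Char) (dp : List (List Int)) (n m : Nat)
    (h : InvDP s1 s2 dp) : InvDP s1 s2 (set2 dp n m (lev s1 s2 n m : Int)) := by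
  intro i j
  by_cases hij : i = n ∧ j = m
  · obtain ⟨rfl, rfl⟩ := hij
    rcases get2_set2_self dp i j (lev s1 s2 i j : Int) with h' | h'
    · exact Or.inr h'
    · rw [h']; exact h i j
  · rw [get2_set2_ne dp n m i j _ (by tauto)]
    exact h i j

theorem minDisA_correct (s1 s2 : List Char) (n m : Nat) (dp : List (List Int))
    (h : InvDP s1 s2 dp) :
    (minDisA s1 s2 n m dp).1 = (lev s1 s2 n m : Int) ∧ InvDP s1 s2 (minDisA s1 s2 n m dp).2 := by
  have main : ∀ (k n m : Nat) (dp : List (List Int)), n + m ≤ k → InvDP s1 s2 dp →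
      (minDisA s1 s2 n m dp).1 = (lev s1 s2 n m : Int) ∧ InvDP s1 s2 (minDisA s1 s2 n m dp).2 := by
    intro k
    induction k with
    | zero =>
      intro n m dp hle hInv
      have hn : n = 0 := by omega
      subst hn
      rw [minDisA]
      simp [lev]
      exact hInv
    | succ k ih =>
      intro n m dp hle hInv
      by_cases hn : n = 0
      · subst hn; rw [minDisA]; simp [lev]; exact hInv
      by_cases hm : m = 0
      · subst hm; rw [minDisA]
        obtain ⟨n', rfl⟩ : ∃ n', n = n' + 1 := ⟨n - 1, by omega⟩
        simp [lev]
        exact hInv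
      obtain ⟨n', rfl⟩ : ∃ n', n = n' + 1 := ⟨n - 1, by omega⟩
      obtain ⟨m', rfl⟩ : ∃ m', m = m' + 1 := ⟨m - 1, by omega⟩
      rw [minDisA]
      simp only [dif_neg hn, dif_neg hm, Nat.add_sub_cancel]
      by_cases hmemo : get2 dp (n' + 1) (m' + 1) ≠ -1
      · rw [if_pos hmemo]
        exact ⟨(hInv (n' + 1) (m' + 1)).resolve_left hmemo, hInv⟩
      rw [if_neg hmemo]
      by_cases hc : s1.getD n' ' ' == s2.getD m' ' '
      · rw [if_pos hc]
        have hlev : lev s1 s2 (n' + 1) (m' + 1) = lev s1 s2 n' m' := by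
          rw [lev_succ_succ, if_pos hc]
        by_cases hdp : get2 dp n' m' = -1
        · rw [if_pos hdp]
          obtain ⟨hv, hI⟩ := ih n' m' dp (by omega) hInv
          refine ⟨by simpa [hlev] using hv, ?_⟩
          have := Inv_set2 s1 s2 (minDisA s1 s2 n' m' dp).2 (n' + 1) (m' + 1) hI
          simpa [hv, hlev] using this
        · rw [if_neg hdp]
          have hv : get2 dp n' m' = (lev s1 s2 n' m' : Int) := (hInv n' m').resolve_left hdp
          refine ⟨by simp [hv, hlev], ?_⟩
          have := Inv_set2 s1 s2 dp (n' + 1) (m' + 1) hInv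
          simpa [hv, hlev] using this
      · rw [if_neg hc]
        -- three sub-lookups
        have H1 : (if get2 dp n' (m' + 1) ≠ -1 then (get2 dp n' (m' + 1), dp)
                   else minDisA s1 s2 n' (m' + 1) dp).1 = (lev s1 s2 n' (m' + 1) : Int) ∧
                  InvDP s1 s2 (if get2 dp n' (m' + 1) ≠ -1 then (get2 dp n' (m' + 1), dp)
                   else minDisA s1 s2 n' (m' + 1) dp).2 := by
          split_ifs with h1
          · exact ⟨(hInv n' (m' + 1)).resolve_left h1, hInv⟩
          · exact ih n' (m' + 1) dp (by omega) hInv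
        obtain ⟨hv1, hI1⟩ := H1
        generalize hq1 : (if get2 dp n' (m' + 1) ≠ -1 then (get2 dp n' (m' + 1), dp)
                   else minDisA s1 s2 n' (m' + 1) dp) = q1 at *
        have H2 : (if get2 q1.2 (n' + 1) m' ≠ -1 then (get2 q1.2 (n' + 1) m', q1.2)
                   else minDisA s1 s2 (n' + 1) m' q1.2).1 = (lev s1 s2 (n' + 1) m' : Int) ∧
                  InvDP s1 s2 (if get2 q1.2 (n' + 1) m' ≠ -1 then (get2 q1.2 (n' + 1) m', q1.2)
                   else minDisA s1 s2 (n' + 1) m' q1.2).2 := by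
          split_ifs with h2
          · exact ⟨(hI1 (n' + 1) m').resolve_left h2, hI1⟩
          · exact ih (n' + 1) m' q1.2 (by omega) hI1
        obtain ⟨hv2, hI2⟩ := H2
        generalize hq2 : (if get2 q1.2 (n' + 1) m' ≠ -1 then (get2 q1.2 (n' + 1) m', q1.2)
                   else minDisA s1 s2 (n' + 1) m' q1.2) = q2 at *
        have H3 : (if get2 q2.2 n' m' ≠ -1 then (get2 q2.2 n' m', q2.2)
                   else minDisA s1 s2 n' m' q2.2).1 = (lev s1 s2 n' m' : Int) ∧
                  InvDP s1 s2 (if get2 q2.2 n' m' ≠ -1 then (get2 q2.2 n' m', q2.2)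
                   else minDisA s1 s2 n' m' q2.2).2 := by
          split_ifs with h3
          · exact ⟨(hI2 n' m').resolve_left h3, hI2⟩
          · exact ih n' m' q2.2 (by omega) hI2
        obtain ⟨hv3, hI3⟩ := H3
        generalize hq3 : (if get2 q2.2 n' m' ≠ -1 then (get2 q2.2 n' m', q2.2)
                   else minDisA s1 s2 n' m' q2.2) = q3 at *
        have hveq : (1 + min q1.1 (min q2.1 q3.1)) = (lev s1 s2 (n' + 1) (m' + 1) : Int) := by
          rw [hv1, hv2, hv3, lev_succ_succ, if_neg hc]
          push_cast
          ring_nf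
        refine ⟨hveq, ?_⟩
        rw [hveq]
        exact Inv_set2 s1 s2 q3.2 (n' + 1) (m' + 1) hI3
  exact main (n + m) n m dp le_rfl h

def rowVal (a b : List Char) (i : Nat) : List Int :=
  (List.range (b.length + 1)).map (fun j => (lev a b i j : Int))

theorem innerRow (a b : List Char) (i0 : Nat) (k : Nat) (hk : k ≤ b.length) :
    (PySem.List.pyRange 1 ((k : Int) + 1) 1).foldl (fun cur j =>
        if PySem.List.pyGetD a (((i0 : Int) + 1) - 1) ' ' == PySem.List.pyGetD b (j - 1) ' ' then
          cur ++ [PySem.List.pyGetD (rowVal a b i0) (j - 1) 0]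
        else
          cur ++ [1 + min (PySem.List.pyGetD (rowVal a b i0) j 0)
                    (min (PySem.List.pyGetD cur (j - 1) 0)
                      (PySem.List.pyGetD (rowVal a b i0) (j - 1) 0))])
        [(i0 : Int) + 1] =
      (List.range (k + 1)).map (fun j => (lev a b (i0 + 1) j : Int)) := by
  induction k with
  | zero =>
    rw [PySem.List.pyRange_one_eq_nil (by norm_num)]
    simp [lev]
  | succ k ih =>
    have h1 : ((k + 1 : Nat) : Int) + 1 = ((k : Int) + 1) + 1 := by push_cast; ring
    rw [h1, PySem.List.pyRange_one_succ_right (by omega), List.foldl_append,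
      ih (by omega)]
    simp only [List.foldl_cons, List.foldl_nil]
    have e1 : ((i0 : Int) + 1) - 1 = ((i0 : Nat) : Int) := by ring
    have e2 : ((k : Int) + 1) - 1 = ((k : Nat) : Int) := by ring
    have e3 : ((k : Int) + 1) = ((k + 1 : Nat) : Int) := by push_cast; ring
    rw [e1, e2]
    rw [PySem.List.pyGetD_natCast a i0 ' ', PySem.List.pyGetD_natCast b k ' ']
    rw [show PySem.List.pyGetD (rowVal a b i0) ((k:Int)+1) 0 = PySem.List.pyGetD (rowVal a b i0) (((k+1:Nat):Int)) 0 by rw [e3]]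
    rw [PySem.List.pyGetD_natCast, PySem.List.pyGetD_natCast, PySem.List.pyGetD_natCast]
    unfold rowVal
    rw [PySem.List.getD_map_range _ _ _ _ (by omega), PySem.List.getD_map_range _ _ _ _ (by omega),
      PySem.List.getD_map_range _ _ _ _ (by omega)]
    rw [List.range_succ (n := k + 1), List.map_append]
    simp only [List.map_cons, List.map_nil]
    rw [lev_succ_succ]
    by_cases hc : a.getD i0 ' ' == b.getD k ' '
    · rw [if_pos hc, if_pos hc]
    · rw [if_neg hc, if_neg hc]
      congr 1
      congr 1
      push_cast
      ring_nf

theorem lev_zero_left (a b : List Char) (m : Nat) : lev a b 0 m = m := by rw [lev]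

theorem outerRows (a b : List Char) (r : Nat) :
    (PySem.List.pyRange 1 ((r : Int) + 1) 1).foldl (fun prev i =>
      (PySem.List.pyRange 1 ((b.length : Int) + 1) 1).foldl (fun cur j =>
        if PySem.List.pyGetD a (i - 1) ' ' == PySem.List.pyGetD b (j - 1) ' ' then
          cur ++ [PySem.List.pyGetD prev (j - 1) 0]
        else
          cur ++ [1 + min (PySem.List.pyGetD prev j 0)
                    (min (PySem.List.pyGetD cur (j - 1) 0) (PySem.List.pyGetD prev (j - 1) 0))])
        [i]) (rowVal a b 0) = rowVal a b r := by
  induction r with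
  | zero =>
    rw [show ((0 : Nat) : Int) + 1 = 1 by norm_num,
      PySem.List.pyRange_one_eq_nil (a := 1) (b := 1) le_rfl]
    rfl
  | succ r ih =>
    have h1 : ((r + 1 : Nat) : Int) + 1 = ((r : Int) + 1) + 1 := by push_cast; ring
    rw [h1, PySem.List.pyRange_one_succ_right (a := 1) (b := (r : Int) + 1) (by omega),
      List.foldl_append, ih]
    simp only [List.foldl_cons, List.foldl_nil]
    rw [innerRow a b r b.length le_rfl]
    rfl

theorem levAlt_eq (a b : List Char) : levAlt a b = (lev a b a.length b.length : Int) := by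
  unfold levAlt
  have h0 : PySem.List.pyRange 0 ((b.length : Int) + 1) 1 = rowVal a b 0 := by
    rw [PySem.List.pyRange_zero]
    unfold rowVal
    have : ((b.length : Int) + 1).toNat = b.length + 1 := by omega
    rw [this]
    exact List.map_congr_left (fun j _ => by rw [lev_zero_left])
  dsimp only
  rw [h0, outerRows a b a.length]
  unfold rowVal
  simp only [PySem.List.pyGetD, PySem.List.pyGet?, PySem.List.pyIdx?, List.length_map,
    List.length_range]
  norm_num

def dA (w nm : String) : Int :=
  (minDisA w.toList nm.toList w.toList.length nm.toList.length
    ((List.range (w.toList.length + 1)).map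
      (fun _ => (List.range (nm.toList.length + 1)).map (fun _ => (-1 : Int))))).1

theorem get2_init (n m i j : Nat) :
    get2 ((List.range (n + 1)).map (fun _ => (List.range (m + 1)).map (fun _ => (-1 : Int)))) i j
      = -1 := by
  unfold get2
  by_cases hi : i < n + 1
  · rw [PySem.List.getD_map_range _ _ _ _ (by simpa using hi)]
    by_cases hj : j < m + 1
    · rw [PySem.List.getD_map_range _ _ _ _ (by simpa using hj)]
    · rw [List.getD_eq_getElem?_getD, List.getElem?_eq_none (by simpa using by omega)]
      rfl
  · have hrow : ((List.range (n + 1)).map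
        (fun _ => (List.range (m + 1)).map (fun _ => (-1 : Int)))).getD i [] = [] := by
      rw [List.getD_eq_getElem?_getD, List.getElem?_eq_none (by simp; omega)]
      rfl
    rw [hrow]
    rfl

theorem dA_eq_lev (w nm : String) :
    dA w nm = (lev w.toList nm.toList w.toList.length nm.toList.length : Int) :=
  (minDisA_correct _ _ _ _ _ (fun i j => Or.inl (get2_init _ _ i j))).1

theorem dA_eq_levAlt (w nm : String) : dA w nm = levAlt w.toList nm.toList := by
  rw [dA_eq_lev, levAlt_eq]

theorem inner_items (h : String → Int) : ∀ (l : List String) (d : PySem.Dict String Int)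
    (g : String → Int), l ⊆ listedCategories →
    d.items = listedCategories.map (fun nm => (nm, g nm)) →
    (l.foldl (fun d nm => d.insert nm (h nm)) d).items =
      listedCategories.map (fun nm => (nm, if nm ∈ l then h nm else g nm)) := by
  intro l
  induction l with
  | nil => intro d g _ hd; simpa using hd
  | cons x l ih =>
    intro d g hsub hd
    have hx : x ∈ listedCategories := hsub (List.mem_cons_self)
    have hcont : d.contains x = true := by
      rw [PySem.Dict.contains_iff_mem_keys]
      simp only [PySem.Dict.keys, hd, List.map_map]
      simpa using hx
    simp only [List.foldl_cons]
    have hd' : (d.insert x (h x)).items =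
        listedCategories.map (fun nm => (nm, if nm = x then h x else g nm)) := by
      rw [PySem.Dict.items_insert_of_contains d (h x) hcont, hd, List.map_map]
      refine List.map_congr_left (fun nm _ => ?_)
      by_cases hnm : nm = x
      · subst hnm; simp
      · simp [hnm]
    rw [ih (d.insert x (h x)) _ (fun a ha => hsub (List.mem_cons_of_mem _ ha)) hd']
    refine List.map_congr_left (fun nm _ => ?_)
    by_cases h1 : nm ∈ l
    · simp [h1]
    · by_cases h2 : nm = x <;> simp [h1, h2]

theorem outer_items (dist : String → String → Int) : ∀ (ws : List String) (w0 : String)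
    (d : PySem.Dict String Int),
    d.items = listedCategories.map (fun nm => (nm, dist w0 nm)) →
    (ws.foldl (fun d w => listedCategories.foldl (fun d nm => d.insert nm (dist w nm)) d) d).items
      = listedCategories.map (fun nm => (nm, dist (ws.getLastD w0) nm)) := by
  intro ws
  induction ws with
  | nil => intro w0 d hd; simpa using hd
  | cons w ws ih =>
    intro w0 d hd
    simp only [List.foldl_cons, List.getLastD_cons]
    refine ih w _ ?_
    rw [inner_items (dist w) listedCategories d (dist w0) (fun a ha => ha) hd]
    exact List.map_congr_left (fun nm hnm => by simp [hnm])

theorem first_items (h : String → Int) :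
    (listedCategories.foldl (fun d nm => d.insert nm (h nm)) PySem.Dict.empty).items =
      listedCategories.map (fun nm => (nm, h nm)) := by
  have := PySem.Dict.items_foldl_insert_fresh listedCategories (fun nm => nm) h PySem.Dict.empty
    (fun a _ => by simp [PySem.Dict.contains_empty]) (by simp; decide)
  simpa using this

theorem head_scan : ∀ (t : List (String × Int)) (a : String × Int) (rest : List (String × Int)),
    (t.foldl (fun acc x => PySem.List.insertBy (fun p q => decide (p.2 < q.2)) x acc)
        (a :: rest)).head? =
      some (t.foldl (fun b x => if x.2 < b.2 then x else b) a) := by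
  intro t
  induction t with
  | nil => simp
  | cons x t ih =>
    intro a rest
    simp only [List.foldl_cons, PySem.List.insertBy]
    by_cases hc : x.2 < a.2
    · rw [if_pos (by simpa using hc), if_pos hc]
      exact ih x (a :: rest)
    · rw [if_neg (by simpa using hc), if_neg hc]
      exact ih a _

theorem opt_scan (f : String → Int) : ∀ (l : List String) (b : String × Int),
    (l.foldl (fun best name =>
        match best with
        | none => some (name, f name)
        | some b => if f name < b.2 then some (name, f name) else some b) (some b)) =
      some (l.foldl (fun b name => if f name < b.2 then (name, f name) else b) b) := by
  intro l
  induction l with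
  | nil => intro b; rfl
  | cons x l ih =>
    intro b
    simp only [List.foldl_cons]
    by_cases hc : f x < b.2
    · rw [if_pos hc, if_pos hc, ih]
    · rw [if_neg hc, if_neg hc, ih]

def firstMin (f : String → Int) : String :=
  ((["cosmetics", "food", "stationary", "frozen", "beverages", "grocery"]).foldl
    (fun b nm => if f nm < b.2 then (nm, f nm) else b) ("clothes", f "clothes")).1

theorem pyGet?_zero {α : Type} (xs : List α) : PySem.List.pyGet? xs 0 = xs.head? := by
  cases xs <;> simp [PySem.List.pyGet?, PySem.List.pyIdx?]

theorem sel_eq (f : String → Int) :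
    ((PySem.List.pyGet? (PySem.Dict.ofList (PySem.List.sorted
        (listedCategories.map (fun nm => (nm, f nm))) (fun p => p.2) false)).keys 0).getD "")
      = firstMin f := by
  have hnodup : ((PySem.List.sorted (listedCategories.map (fun nm => (nm, f nm)))
      (fun p => p.2) false).map Prod.fst).Nodup := by
    have hperm := (PySem.List.sorted_perm (listedCategories.map (fun nm => (nm, f nm)))
      (fun p => p.2) false).map Prod.fst
    refine hperm.nodup_iff.mpr ?_
    show listedCategories.Nodup
    decide
  have hkeys : (PySem.Dict.ofList (PySem.List.sorted (listedCategories.map (fun nm => (nm, f nm)))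
      (fun p => p.2) false)).keys =
      (PySem.List.sorted (listedCategories.map (fun nm => (nm, f nm))) (fun p => p.2) false).map
        Prod.fst := by
    have h := PySem.Dict.keys_foldl_insert_key
      (PySem.List.sorted (listedCategories.map (fun nm => (nm, f nm))) (fun p => p.2) false)
      Prod.fst (fun d x => x.2) PySem.Dict.empty
    have hek : (PySem.Dict.empty : PySem.Dict String Int).keys = [] := rfl
    rw [hek, PySem.Set.update_nil_left, PySem.Set.ofList_eq_self_of_nodup _ hnodup] at h
    exact h
  rw [hkeys, pyGet?_zero, List.head?_map]
  rw [PySem.List.sorted_eq_foldl_insertBy]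
  have hcats : listedCategories.map (fun nm => (nm, f nm)) =
      ("clothes", f "clothes") ::
        (["cosmetics", "food", "stationary", "frozen", "beverages", "grocery"]).map
          (fun nm => (nm, f nm)) := rfl
  rw [hcats, List.foldl_cons]
  have hins : PySem.List.insertBy (fun a b => decide (a.2 < b.2)) ("clothes", f "clothes")
      ([] : List (String × Int)) = [("clothes", f "clothes")] := by
    simp [PySem.List.insertBy]
  rw [hins, head_scan]
  rw [List.foldl_map]
  rfl

theorem word_last (w : String) (ws : List String) :
    (PySem.List.pyGet? (w :: ws) (-1)).getD "" = ws.getLastD w := by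
  have h1 : PySem.List.pyGet? (w :: ws) (-1) = (w :: ws)[ws.length]? := by
    simp [PySem.List.pyGet?, PySem.List.pyIdx?]
  rw [h1]
  have h2 : (w :: ws)[ws.length]? = (w :: ws).getLast? := by
    rw [List.getLast?_eq_getElem?, List.length_cons, Nat.add_sub_cancel]
  rw [h2, ← List.getLastD_eq_getLast?, List.getLastD_cons]

theorem A_res (w : String) (ws : List String) :
    recognizeCategory (w :: ws) = firstMin (dA (ws.getLastD w)) := by
  show ((PySem.List.pyGet? (PySem.Dict.ofList (PySem.List.sorted
      ((w :: ws).foldl (fun d tw => listedCategories.foldl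
          (fun d nm => d.insert nm (dA tw nm)) d) PySem.Dict.empty).items
      (fun p => p.2) false)).keys 0).getD "") = firstMin (dA (ws.getLastD w))
  rw [List.foldl_cons]
  rw [outer_items dA ws w _ (first_items (dA w))]
  exact sel_eq (dA (ws.getLastD w))

theorem B_res (w : String) (ws : List String) :
    recognizeCategory_alt (w :: ws) =
      firstMin (fun nm => levAlt (ws.getLastD w).toList nm.toList) := by
  show ((listedCategories.foldl (fun best name =>
      match best with
      | none => some (name, levAlt ((PySem.List.pyGet? (w :: ws) (-1)).getD "").toList name.toList)
      | some b => if levAlt ((PySem.List.pyGet? (w :: ws) (-1)).getD "").toList name.toList < b.2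
          then some (name, levAlt ((PySem.List.pyGet? (w :: ws) (-1)).getD "").toList name.toList)
          else some b) (none : Option (String × Int))).map Prod.fst).getD "" = _
  rw [word_last]
  have hcats : listedCategories =
      "clothes" :: ["cosmetics", "food", "stationary", "frozen", "beverages", "grocery"] := rfl
  rw [hcats, List.foldl_cons]
  rw [opt_scan (fun nm => levAlt (ws.getLastD w).toList nm.toList)]
  rfl

theorem final (trigram : List String) (hpre : trigram ≠ []) :
    recognizeCategory trigram = recognizeCategory_alt trigram := by
  obtain ⟨w, ws, rfl⟩ : ∃ w ws, trigram = w :: ws := by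
    cases trigram with
    | nil => exact absurd rfl hpre
    | cons w ws => exact ⟨w, ws, rfl⟩
  rw [A_res, B_res]
  congr 1
  funext nm
  exact dA_eq_levAlt _ nm

-- ===== VERDICT (by name: the statement is the Claim_ definition above) =====
theorem recognizeCategory_spec : Claim_equal_recognizeCategory := by
  intro trigram _ hpre
  unfold Spec_recognizeCategory
  exact final trigram hpre
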